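-- pv_equiv track=rewrite | github.com/JW12450/DataStructure-Algorithm | Category/Greedy/12931_두배 더하기.py | max_odd_index
-- ===== SOURCE A (Python) =====
-- def max_odd_index(array):
--     max = 0
--     max_index = 0
--     for i, a in enumerate(array):
--         if a %2 == 1 and a > max:
--             max = a
--             max_index = i
--     return max_index
-- ===== SOURCE B (Python) =====
-- def max_odd_index(array):
--     candidates = [(i, a) for i, a in enumerate(array) if a % 2 == 1 and a > 0]
--     if not candidates:
--         return 0
--     return max(candidates, key=lambda p: p[1])[0]
-- ===== Notes on version B (the rewrite author's own statement) =====
-- stated objective: alternative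
-- what changed: A's fused running-max scan with mutable (max, max_index) state is replaced by a filter pass collecting the positive odd (index, value) candidates followed by a separate max-by-value reduction (Python's max with key, first-extremal tie-break).
import Mathlib
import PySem

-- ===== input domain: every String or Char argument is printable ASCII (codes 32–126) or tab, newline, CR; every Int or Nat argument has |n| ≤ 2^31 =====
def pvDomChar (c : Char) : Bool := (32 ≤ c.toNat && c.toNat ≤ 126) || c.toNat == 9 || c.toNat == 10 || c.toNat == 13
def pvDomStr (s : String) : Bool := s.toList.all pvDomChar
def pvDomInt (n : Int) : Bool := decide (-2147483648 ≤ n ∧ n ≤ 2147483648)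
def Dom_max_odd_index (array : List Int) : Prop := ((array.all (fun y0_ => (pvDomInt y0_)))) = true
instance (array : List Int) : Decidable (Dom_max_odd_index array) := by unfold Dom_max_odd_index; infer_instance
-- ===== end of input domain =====

-- B replaces A's fused running-max scan by a filter pass (positive odd candidates) plus a separate max-by-value reduction; alternative decomposition, same O(n) cost.


-- ===== PORT A =====
-- A's loop body: 'if a % 2 == 1 and a > max: max, max_index = a, i'
def pvStepA (s : Int × Int) (p : Int × Int) : Int × Int :=
  if (PySem.Int.mod p.2 2 == 1) && decide (s.1 < p.2) then (p.2, p.1) else s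

-- literal port: running-max loop over enumerate(array) with state (max, max_index), both starting at 0
def max_odd_index (array : List Int) : Int :=
  (List.foldl pvStepA (0, 0) (PySem.List.enumerate array)).2

-- ===== PORT B =====
-- literal port of Source B: filter enumerate(array) to positive odd candidates, then max(…, key=lambda p: p[1])[0]
def max_odd_index_alt (array : List Int) : Int :=
  let candidates :=
    (PySem.List.enumerate array).filter
      (fun p => (PySem.Int.mod p.2 2 == 1) && decide (0 < p.2))
  match PySem.List.max? candidates (fun p => p.2) with
  | none => 0
  | some p => p.1

-- ===== PRECONDITION & SPEC =====
def Spec_max_odd_index (array : List Int) (out : Int) : Prop := out = max_odd_index_alt array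
instance (array : List Int) (out : Int) : Decidable (Spec_max_odd_index array out) := by unfold Spec_max_odd_index; infer_instance

-- ===== CLAIM (what is proved, stated in full; the proofs are below) =====
def Claim_equal_max_odd_index : Prop := ∀ (array : List Int), Dom_max_odd_index array → Spec_max_odd_index array (max_odd_index array)

-- ===== LEMMAS AND PROOFS =====

-- index extraction used in the lemma statements
def pvOut (o : Option (Int × Int)) : Int :=
  match o with
  | none => 0
  | some q => q.1

-- B's max?-fold body, fused with the filter condition (shape produced by List.foldl_filter)
def pvStepM (acc : Option (Int × Int)) (x : Int × Int) : Option (Int × Int) :=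
  if ((PySem.Int.mod x.2 2 == 1) && decide (0 < x.2)) = true then
    (match acc with
     | none => some x
     | some m => if m.2 < x.2 then some x else some m)
  else acc

theorem pvStepA_pos {s p : Int × Int} (h1 : p.2 % 2 = 1) (h2 : s.1 < p.2) :
    pvStepA s p = (p.2, p.1) := by simp [pvStepA, h1, h2]

theorem pvStepA_neg {s p : Int × Int} (h : ¬(p.2 % 2 = 1 ∧ s.1 < p.2)) :
    pvStepA s p = s := by
  rcases not_and_or.mp h with h' | h' <;> simp [pvStepA, h']

theorem pvStepM_none_pos {x : Int × Int} (h1 : x.2 % 2 = 1) (h2 : 0 < x.2) :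
    pvStepM none x = some x := by simp [pvStepM, h1, h2]

theorem pvStepM_none_neg {x : Int × Int} (h : ¬(x.2 % 2 = 1 ∧ 0 < x.2)) :
    pvStepM none x = none := by
  rcases not_and_or.mp h with h' | h' <;> simp [pvStepM, h']

theorem pvStepM_some_lt {m x : Int × Int} (h1 : x.2 % 2 = 1) (h2 : 0 < x.2)
    (h3 : m.2 < x.2) : pvStepM (some m) x = some x := by simp [pvStepM, h1, h2, h3]

theorem pvStepM_some_keep {m x : Int × Int} (h : ¬ m.2 < x.2) :
    pvStepM (some m) x = some m := by simp [pvStepM, h]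

theorem pvStepM_not_cand {acc : Option (Int × Int)} {x : Int × Int}
    (h : ¬(x.2 % 2 = 1 ∧ 0 < x.2)) : pvStepM acc x = acc := by
  rcases not_and_or.mp h with h' | h' <;> simp [pvStepM, h']

-- once a positive candidate is held, the two folds stay in lock-step
theorem pv_lockstep (l : List (Int × Int)) :
    ∀ (j b : Int), 0 < b →
      ∃ q, List.foldl pvStepM (some (j, b)) l = some q ∧
           List.foldl pvStepA (b, j) l = (q.2, q.1) ∧ 0 < q.2 := by
  induction l with
  | nil => intro j b hb; exact ⟨(j, b), rfl, rfl, hb⟩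
  | cons x t ih =>
    intro j b hb
    simp only [List.foldl_cons]
    by_cases hodd : x.2 % 2 = 1
    · by_cases hlt : b < x.2
      · have h0 : 0 < x.2 := lt_trans hb hlt
        rw [pvStepA_pos hodd hlt, pvStepM_some_lt hodd h0 hlt]
        exact ih x.1 x.2 h0
      · rw [pvStepA_neg (by tauto), pvStepM_some_keep hlt]
        exact ih j b hb
    · rw [pvStepA_neg (by tauto), pvStepM_not_cand (by tauto)]
      exact ih j b hb

-- from the initial state (0,0) / none, the returned index agrees
theorem pv_main (l : List (Int × Int)) :
    (List.foldl pvStepA (0, 0) l).2 = pvOut (List.foldl pvStepM none l) := by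
  induction l with
  | nil => rfl
  | cons x t ih =>
    simp only [List.foldl_cons]
    by_cases hodd : x.2 % 2 = 1
    · by_cases h0 : (0 : Int) < x.2
      · rw [pvStepA_pos hodd h0, pvStepM_none_pos hodd h0]
        obtain ⟨q, h1, h2, _⟩ := pv_lockstep t x.1 x.2 h0
        rw [h2, show List.foldl pvStepM (some x) t = some q from h1]
        rfl
      · rw [pvStepA_neg (by tauto), pvStepM_none_neg (by tauto)]
        exact ih
    · rw [pvStepA_neg (by tauto), pvStepM_none_neg (by tauto)]
      exact ih

theorem pv_alt_eq (array : List Int) :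
    max_odd_index_alt array = pvOut (List.foldl pvStepM none (PySem.List.enumerate array)) := by
  have hF : PySem.List.max?
      ((PySem.List.enumerate array).filter
        (fun p => (PySem.Int.mod p.2 2 == 1) && decide (0 < p.2)))
      (fun p : Int × Int => p.2)
      = List.foldl pvStepM none (PySem.List.enumerate array) := by
    unfold PySem.List.max?
    simp only [List.foldl_filter]
    apply List.foldl_ext
    intro acc y _
    rcases acc with _ | m <;> rfl
  show (match PySem.List.max?
      ((PySem.List.enumerate array).filter
        (fun p => (PySem.Int.mod p.2 2 == 1) && decide (0 < p.2)))
      (fun p : Int × Int => p.2) with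
    | none => (0 : Int)
    | some p => p.1) = pvOut (List.foldl pvStepM none (PySem.List.enumerate array))
  rw [hF]
  rcases List.foldl pvStepM none (PySem.List.enumerate array) with _ | p <;> rfl

-- ===== VERDICT (by name: the statement is the Claim_ definition above) =====
theorem max_odd_index_spec : Claim_equal_max_odd_index := by
  intro array _
  unfold Spec_max_odd_index max_odd_index
  rw [pv_alt_eq]
  exact pv_main (PySem.List.enumerate array)
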